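-- pv_equiv track=rewrite | github.com/rajlath/rkl_codes | Codeeval/consecutive_prime.py | solve
-- ===== SOURCE A (Python) =====
-- def solve(beads, pos):
-- 	if len(beads) == pos:
-- 		return 1 if 1 + beads[- 1] in prime_list else 0
-- 	result = 0
-- 	if beads[pos] + beads[pos-1] in prime_list:
-- 		result += solve(beads, pos + 1)
-- 	for i in range(pos+2, len(beads), 2):
-- 		if beads[pos-1] + beads[i] in prime_list:
-- 			beads[i], beads[pos] = beads[pos], beads[i]
-- 			result += solve(beads, pos + 1)
-- 			beads[i], beads[pos] = beads[pos], beads[i]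
-- 	return result
--
-- prime_list = {2, 3, 5, 7, 11, 13, 17, 19, 23, 29, 31}
-- ===== SOURCE B (Python) =====
-- prime_list = {2, 3, 5, 7, 11, 13, 17, 19, 23, 29, 31}
--
-- def count(prev, xs, ys):
--     # place one bead drawn from xs next to prev, then alternate to the other pool
--     if not xs and not ys:
--         return 1 if 1 + prev in prime_list else 0
--     total = 0
--     for k, b in enumerate(xs):
--         if prev + b in prime_list:
--             total += count(b, ys, xs[:k] + xs[k+1:])
--     return total
--
-- def solve(beads, pos):
--     return count(beads[pos-1], beads[pos::2], beads[pos+1::2])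
-- ===== Notes on version B (the rewrite author's own statement) =====
-- stated objective: alternative
-- what changed: A backtracks by swapping elements of the single mutable beads list in place (restoring after each recursive call) and indexing with pos/pos-1/range(pos+2,len,2); B instead splits the beads once into the two parity pools beads[pos::2] and beads[pos+1::2] and counts by a pure recursion that picks each candidate from the current pool, carrying the previously placed bead explicitly and passing reduced pool copies, with no mutation or index arithmetic.
-- outside the precondition, e.g. on solve([1, 6], -1): A returns 2, B returns 1; on solve([4, 10, 11, 16, 1, 10], -2): A returns 0, B returns 1
import Mathlib
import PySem

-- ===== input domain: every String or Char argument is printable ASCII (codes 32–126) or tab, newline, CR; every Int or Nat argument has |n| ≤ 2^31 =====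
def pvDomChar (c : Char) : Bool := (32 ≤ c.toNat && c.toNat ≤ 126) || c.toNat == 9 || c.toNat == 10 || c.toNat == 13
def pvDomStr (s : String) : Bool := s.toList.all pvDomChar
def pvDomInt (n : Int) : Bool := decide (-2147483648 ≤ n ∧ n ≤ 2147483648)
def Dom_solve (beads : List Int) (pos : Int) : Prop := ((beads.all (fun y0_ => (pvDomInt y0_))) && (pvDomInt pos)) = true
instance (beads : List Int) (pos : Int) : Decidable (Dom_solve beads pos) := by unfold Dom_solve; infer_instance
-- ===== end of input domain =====

-- B replaces A's in-place swap backtracking over one mutable list by a pure recursion over the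
-- two parity pools (remaining beads at even/odd positions) carrying the previously placed bead;
-- objective: alternative (A mutates `beads` during the search but restores it before returning,
-- so the call's net effect on the argument is none — the equivalence is about the return value).

-- ===== PORT A =====
def pvPrimes : List Int := [2, 3, 5, 7, 11, 13, 17, 19, 23, 29, 31]

-- 'beads[i], beads[pos] = beads[pos], beads[i]' (simultaneous assignment; exact wherever Python does not raise)
def pvSwap (bs : List Int) (p i : Int) : List Int :=
  PySem.List.pySetD (PySem.List.pySetD bs i (PySem.List.pyGetD bs p 0)) p (PySem.List.pyGetD bs i 0)

-- fuel = number of remaining recursion frames (len - pos + 1 under Pre_); the 0 case is unreachable there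
def solveGo : Nat → List Int → Int → Int
  | 0, _, _ => 0
  | fuel + 1, beads, pos =>
    if (beads.length : Int) = pos then
      if pvPrimes.contains (1 + PySem.List.pyGetD beads (-1) 0) then 1 else 0
    else
      let result : Int :=
        if pvPrimes.contains (PySem.List.pyGetD beads pos 0 + PySem.List.pyGetD beads (pos - 1) 0) then
          solveGo fuel beads (pos + 1)
        else 0
      (PySem.List.pyRange (pos + 2) (beads.length : Int) 2).foldl
        (fun acc i =>
          if pvPrimes.contains (PySem.List.pyGetD beads (pos - 1) 0 + PySem.List.pyGetD beads i 0) then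
            acc + solveGo fuel (pvSwap beads pos i) (pos + 1)
          else acc)
        result

def solve (beads : List Int) (pos : Int) : Int :=
  solveGo ((beads.length - pos).toNat + 1) beads pos

-- ===== PORT B =====
-- count(prev, xs, ys): fuel = xs.length + ys.length + 1 remaining frames; the 0 case is unreachable
def countGo : Nat → Int → List Int → List Int → Int
  | 0, _, _, _ => 0
  | fuel + 1, prev, xs, ys =>
    if xs = [] ∧ ys = [] then
      if pvPrimes.contains (1 + prev) then 1 else 0
    else
      (PySem.List.enumerate xs).foldl
        (fun total kb =>
          if pvPrimes.contains (prev + kb.2) then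
            total + countGo fuel kb.2 ys
              (PySem.List.slice xs none (some kb.1) ++ PySem.List.slice xs (some (kb.1 + 1)) none)
          else total)
        0

def solve_alt (beads : List Int) (pos : Int) : Int :=
  let prev := PySem.List.pyGetD beads (pos - 1) 0
  let xs := (PySem.List.slice? beads (some pos) none 2).getD []
  let ys := (PySem.List.slice? beads (some (pos + 1)) none 2).getD []
  countGo (xs.length + ys.length + 1) prev xs ys

-- ===== PRECONDITION & SPEC =====
-- Pre_ excludes: pos > len(beads), pos = 0 on an empty list and pos ≤ -len(beads), where A raises
-- IndexError; and negative pos, where A's indices beads[pos], beads[pos-1] wrap around to the end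
-- of the list, so the value A returns there is an accidental artefact of Python negative indexing
-- on a call that is outside the search's meaning.
def Pre_solve (beads : List Int) (pos : Int) : Prop :=
  0 ≤ pos ∧ pos ≤ beads.length ∧ beads ≠ []
instance (beads : List Int) (pos : Int) : Decidable (Pre_solve beads pos) := by
  unfold Pre_solve; infer_instance

def pvWitness_solve : List Int × Int := ([1, 4, 3, 2], 1)

def Spec_solve (beads : List Int) (pos : Int) (out : Int) : Prop := out = solve_alt beads pos
instance (beads : List Int) (pos : Int) (out : Int) : Decidable (Spec_solve beads pos out) := by
  unfold Spec_solve; infer_instance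

-- ===== CLAIM (what is proved, stated in full; the proofs are below) =====
def Claim_equal_solve : Prop :=
  ∀ (beads : List Int) (pos : Int), Dom_solve beads pos → Pre_solve beads pos →
    Spec_solve beads pos (solve beads pos)

-- ===== LEMMAS AND PROOFS =====

-- the sublist of every other element, starting with the first (beads[p::2] = everyOther (beads.drop p))
def everyOther : List Int → List Int
  | [] => []
  | [x] => [x]
  | x :: _ :: l => x :: everyOther l

-- sum over all ways to pick one element out of a list: selSum F [b1,…,bn] = Σᵢ F bᵢ (rest without bᵢ)
def selSum (F : Int → List Int → Int) : List Int → Int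
  | [] => 0
  | x :: l => F x l + selSum (fun b t => F b (x :: t)) l

theorem length_everyOther : ∀ l : List Int, (everyOther l).length = (l.length + 1) / 2 := by
  intro l
  induction l using everyOther.induct with
  | case1 => rfl
  | case2 x => simp [everyOther]
  | case3 x y l ih => simp [everyOther, ih]; omega
theorem getElem?_everyOther : ∀ (l : List Int) (k : Nat), (everyOther l)[k]? = l[2 * k]? := by
  intro l
  induction l using everyOther.induct with
  | case1 => simp [everyOther]
  | case2 x =>
    intro k
    cases k with
    | zero => rfl
    | succ k =>
      have h2 : 2 * (k + 1) = 2 * k + 1 + 1 := by omega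
      simp [everyOther, h2]
  | case3 x y l ih =>
    intro k
    cases k with
    | zero => rfl
    | succ k =>
      have h2 : 2 * (k + 1) = 2 * k + 1 + 1 := by omega
      simp [everyOther, h2, ih k]
theorem everyOther_cons (x : Int) (l : List Int) : everyOther (x :: l) = x :: everyOther l.tail := by
  cases l <;> rfl

theorem fmRange : ∀ l : List Int,
    (List.range ((l.length + 1) / 2)).filterMap (fun k => l[2 * k]?) = everyOther l := by
  intro l
  induction l using everyOther.induct with
  | case1 => simp [everyOther]
  | case2 x => simp [everyOther]
  | case3 x y l ih =>
    have hc : ((x :: y :: l).length + 1) / 2 = (l.length + 1) / 2 + 1 := by simp; omega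
    rw [hc, List.range_succ_eq_map]
    have h0 : (x :: y :: l)[2 * 0]? = some x := rfl
    rw [List.filterMap_cons, h0, List.filterMap_map]
    have hff : ∀ k ∈ List.range ((l.length + 1) / 2),
        ((fun k => (x :: y :: l)[2 * k]?) ∘ Nat.succ) k = l[2 * k]? := by
      intro k _
      have h2 : 2 * Nat.succ k = 2 * k + 1 + 1 := by omega
      simp [h2]
    rw [List.filterMap_congr hff, ih]
    rfl

-- beads[p::2] is everyOther (beads.drop p), for every natural p (out-of-range p clamps on both sides)
theorem slice?_two (bs : List Int) (p : Nat) :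
    PySem.List.slice? bs (some (p : Int)) none 2 = some (everyOther (bs.drop p)) := by
  unfold PySem.List.slice? PySem.List.sliceIndices
  norm_num
  have h1 : (if (p : Int) < 0 then max ((p : Int) + (bs.length : Int)) 0 else min ↑p ↑bs.length)
      = min (p : Int) (bs.length : Int) := if_neg (by omega)
  rw [h1]
  by_cases hp : p < bs.length
  · have h2 : min (p : Int) (bs.length : Int) = (p : Int) := by omega
    rw [h2, if_pos (by exact_mod_cast hp)]
    have h3 : ((bs.length : Int) - ↑p + 2 - 1) / 2 = (((bs.length - p + 1) / 2 : Nat) : Int) := by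
      omega
    rw [h3, Int.toNat_natCast]
    have h4 : bs.length - p + 1 = ((bs.drop p).length + 1) := by simp
    rw [h4]
    have h5 : ∀ k ∈ List.range (((bs.drop p).length + 1) / 2),
        bs[((p : Int) + 2 * (k : Int)).toNat]? = (bs.drop p)[2 * k]? := by
      intro k _
      have : ((p : Int) + 2 * (k : Int)).toNat = p + 2 * k := by omega
      rw [this, List.getElem?_drop]
    rw [List.filterMap_congr h5, fmRange]
  · have h2 : min (p : Int) (bs.length : Int) = (bs.length : Int) := by omega
    rw [h2, if_neg (by omega)]
    rw [List.drop_eq_nil_of_le (by omega)]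
    simp [everyOther]
theorem foldl_ite_add {β : Type} (l : List β) (c : β → Prop) [DecidablePred c]
    (g : β → Int) (a : Int) :
    l.foldl (fun acc x => if c x then acc + g x else acc) a
      = a + (l.map (fun x => if c x then g x else 0)).sum := by
  have h : (fun (acc : Int) (x : β) => if c x then acc + g x else acc)
      = fun acc x => acc + (if c x then g x else 0) := by
    funext acc x; split_ifs <;> simp
  rw [h, PySem.List.foldl_add]

theorem selSum_congr (F G : Int → List Int → Int) :
    ∀ l : List Int, (∀ b t, F b t = G b t) → selSum F l = selSum G l := by
  intro l
  induction l generalizing F G with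
  | nil => intro _; rfl
  | cons x l ih =>
    intro h
    simp only [selSum, h]
theorem selSum_enum (F : Int → List Int → Int) :
    ∀ (l pre : List Int),
      ((PySem.List.enumerate l (pre.length : Int)).map
        (fun kb => F kb.2 (PySem.List.slice (pre ++ l) none (some kb.1)
            ++ PySem.List.slice (pre ++ l) (some (kb.1 + 1)) none))).sum
        = selSum (fun b t => F b (pre ++ t)) l := by
  intro l
  induction l with
  | nil => intro pre; simp [PySem.List.enumerate, selSum]
  | cons x l ih =>
    intro pre
    rw [PySem.List.enumerate_cons, List.map_cons, List.sum_cons]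
    have hhead : PySem.List.slice (pre ++ x :: l) none (some ((pre.length : Nat) : Int))
        ++ PySem.List.slice (pre ++ x :: l) (some (((pre.length : Nat) : Int) + 1)) none
        = pre ++ l := by
      rw [PySem.List.slice_to_natCast, List.take_left]
      have h1 : ((pre.length : Nat) : Int) + 1 = (((pre.length + 1 : Nat)) : Int) := by push_cast; ring
      rw [h1, PySem.List.slice_from_natCast, List.drop_length_add_append 1]
      rfl
    have htail : ((pre.length : Int) + 1) = (((pre ++ [x]).length : Nat) : Int) := by
      simp
    rw [hhead, htail]
    have happ : pre ++ x :: l = (pre ++ [x]) ++ l := by simp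
    rw [show (fun kb => F kb.2 (PySem.List.slice (pre ++ x :: l) none (some kb.1)
            ++ PySem.List.slice (pre ++ x :: l) (some (kb.1 + 1)) none))
        = (fun (kb : Int × Int) => F kb.2 (PySem.List.slice ((pre ++ [x]) ++ l) none (some kb.1)
            ++ PySem.List.slice ((pre ++ [x]) ++ l) (some (kb.1 + 1)) none)) from by rw [happ]]
    rw [ih (pre ++ [x])]
    simp only [selSum]
    congr 1
    apply selSum_congr
    intro b t
    simp
theorem selSum_eq_sum_range (F : Int → List Int → Int) :
    ∀ l : List Int,
      selSum F l = ((List.range l.length).map (fun k => F (l.getD k 0) (l.eraseIdx k))).sum := by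
  intro l
  induction l generalizing F with
  | nil => simp [selSum]
  | cons x l ih =>
    rw [List.length_cons, List.range_succ_eq_map, List.map_cons, List.sum_cons, List.map_map]
    simp only [selSum]
    rw [show (x :: l).getD 0 0 = x from rfl, show (x :: l).eraseIdx 0 = l from rfl,
      ih (fun b t => F b (x :: t))]
    have hmap : List.map ((fun k => F ((x :: l).getD k 0) ((x :: l).eraseIdx k)) ∘ Nat.succ)
        (List.range l.length)
        = List.map (fun k => F (l.getD k 0) (x :: l.eraseIdx k)) (List.range l.length) := by
      apply List.map_congr_left
      intro k _
      simp [List.eraseIdx_cons_succ, Function.comp]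
    rw [hmap]
theorem selSum_perm (F : Int → List Int → Int)
    (HF : ∀ b t t', t.Perm t' → F b t = F b t') :
    ∀ {xs xs' : List Int}, xs.Perm xs' → selSum F xs = selSum F xs' := by
  intro xs xs' h
  induction h generalizing F with
  | nil => rfl
  | cons x h ih =>
    simp only [selSum]
    rw [HF _ _ _ h, ih (fun b t => F b (x :: t)) (fun b t t' ht => HF b (x :: t) (x :: t') (ht.cons x))]
  | swap x y l =>
    simp only [selSum]
    have h1 : F x (y :: l) = F x (y :: l) := rfl
    have hsel : selSum (fun b t => F b (y :: x :: t)) l = selSum (fun b t => F b (x :: y :: t)) l := by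
      apply selSum_congr
      intro b t
      exact HF b _ _ (List.Perm.swap x y t)
    rw [hsel]
    ring
  | trans h1 h2 ih1 ih2 =>
    exact (ih1 F HF).trans (ih2 F HF)
-- countGo in its non-base case is a selection sum over the first pool
theorem countGo_succ (fuel : Nat) (prev : Int) (xs ys : List Int) (h : ¬(xs = [] ∧ ys = [])) :
    countGo (fuel + 1) prev xs ys
      = selSum (fun b t => if pvPrimes.contains (prev + b) then countGo fuel b ys t else 0) xs := by
  rw [countGo, if_neg h]
  have hfold := foldl_ite_add (PySem.List.enumerate xs)
      (fun kb : Int × Int => pvPrimes.contains (prev + kb.2) = true)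
      (fun kb : Int × Int => countGo fuel kb.2 ys
        (PySem.List.slice xs none (some kb.1) ++ PySem.List.slice xs (some (kb.1 + 1)) none)) 0
  simp only at hfold
  rw [hfold, zero_add]
  have henum := selSum_enum
      (fun b t => if pvPrimes.contains (prev + b) then countGo fuel b ys t else 0) xs []
  simp only [List.nil_append, List.length_nil, Nat.cast_zero] at henum
  exact henum
theorem countGo_perm : ∀ (fuel : Nat) (prev : Int) {xs xs' ys ys' : List Int},
    xs.Perm xs' → ys.Perm ys' → countGo fuel prev xs ys = countGo fuel prev xs' ys' := by
  intro fuel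
  induction fuel with
  | zero => intro _ _ _ _ _ _ _; rfl
  | succ fuel ih =>
    intro prev xs xs' ys ys' hx hy
    by_cases hb : xs = [] ∧ ys = []
    · have hb' : xs' = [] ∧ ys' = [] := by
        constructor
        · exact List.Perm.eq_nil (hb.1 ▸ hx).symm
        · exact List.Perm.eq_nil (hb.2 ▸ hy).symm
      rw [countGo, countGo, if_pos hb, if_pos hb']
    · have hb' : ¬(xs' = [] ∧ ys' = []) := by
        intro hc
        exact hb ⟨List.Perm.eq_nil (hc.1 ▸ hx), List.Perm.eq_nil (hc.2 ▸ hy)⟩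
      rw [countGo_succ fuel prev xs ys hb, countGo_succ fuel prev xs' ys' hb']
      have hstep : selSum (fun b t => if pvPrimes.contains (prev + b) then countGo fuel b ys t else 0) xs
          = selSum (fun b t => if pvPrimes.contains (prev + b) then countGo fuel b ys' t else 0) xs := by
        apply selSum_congr
        intro b t
        split_ifs with hc
        · exact ih b hy (List.Perm.refl t)
        · rfl
      rw [hstep]
      apply selSum_perm
      · intro b t t' ht
        split_ifs with hc
        · exact ih b (List.Perm.refl ys') ht
        · rfl
      · exact hx
-- the bridge: A's frame at position p computes B's count over the two parity pools
theorem bridge : ∀ (fuel : Nat) (bs : List Int) (p : Nat), p ≤ bs.length → bs ≠ [] →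
    solveGo fuel bs (p : Int)
      = countGo fuel (PySem.List.pyGetD bs ((p : Int) - 1) 0)
          (everyOther (bs.drop p)) (everyOther (bs.drop (p + 1))) := by
  intro fuel
  induction fuel with
  | zero => intro bs p _ _; rfl
  | succ fuel ih =>
    intro bs p hp hne
    have hlen1 : 1 ≤ bs.length := List.length_pos_of_ne_nil hne
    by_cases hlen : p = bs.length
    · subst hlen
      rw [solveGo, if_pos rfl, List.drop_length, List.drop_eq_nil_of_le (by omega)]
      have hevO : everyOther [] = [] := rfl
      rw [hevO, countGo, if_pos (And.intro rfl rfl)]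
      have h1 : PySem.List.pyGetD bs (-1) 0 = bs.getLast hne := PySem.List.pyGetD_neg_one bs 0 hne
      have h2 : ((bs.length : Int) - 1) = ((bs.length - 1 : Nat) : Int) := by omega
      rw [h1, h2, PySem.List.pyGetD_natCast]
      have h3 : bs.getD (bs.length - 1) 0 = bs.getLast hne := by
        rw [List.getD_eq_getElem _ _ (by omega), List.getLast_eq_getElem]
      rw [h3]
    · have hplt : p < bs.length := lt_of_le_of_ne hp hlen
      set n := bs.length with hn
      set prev := PySem.List.pyGetD bs ((p : Int) - 1) 0 with hprev
      set ys := everyOther (bs.drop (p + 1)) with hys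
      set tl := everyOther (bs.drop (p + 2)) with htl
      have hxs : everyOther (bs.drop p) = bs.getD p 0 :: tl := by
        rw [List.drop_eq_getElem_cons hplt, everyOther_cons, List.tail_drop,
          List.getD_eq_getElem _ _ hplt]
      have htllen : tl.length = (n - (p + 2) + 1) / 2 := by
        rw [htl, length_everyOther, List.length_drop]
      -- A side: unfold the frame and turn the loop into a sum
      rw [solveGo, if_neg (by omega : ¬ ((n : Int) = (p : Int)))]
      simp only []
      have hA := foldl_ite_add (PySem.List.pyRange ((p : Int) + 2) (n : Int) 2)
          (fun i => pvPrimes.contains (prev + PySem.List.pyGetD bs i 0) = true)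
          (fun i => solveGo fuel (pvSwap bs (p : Int) i) ((p : Int) + 1))
          (if pvPrimes.contains (PySem.List.pyGetD bs (p : Int) 0 + prev) = true then
            solveGo fuel bs ((p : Int) + 1) else 0)
      simp only at hA
      rw [hA]
      -- B side: unfold one level of the count
      rw [hxs, countGo_succ fuel prev _ ys (by simp)]
      simp only [selSum]
      congr 1
      -- the first branch of A's frame = the k = 0 pick of B's selection sum
      · have hg : PySem.List.pyGetD bs (p : Int) 0 = bs.getD p 0 := by
          rw [PySem.List.pyGetD_natCast]
        rw [hg, add_comm (bs.getD p 0) prev]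
        have hcast : ((p : Int) + 1) = (((p + 1 : Nat)) : Int) := by push_cast; ring
        have hv : solveGo fuel bs ((p : Int) + 1) = countGo fuel (bs.getD p 0) ys tl := by
          rw [hcast, ih bs (p + 1) (by omega) hne, ← hys, ← htl]
          have hc1 : (((p + 1 : Nat)) : Int) - 1 = ((p : Nat) : Int) := by push_cast; ring
          rw [hc1, PySem.List.pyGetD_natCast]
        rw [hv]
      -- the loop over i = p+2, p+4, … = the k ≥ 1 picks of B's selection sum
      · rw [selSum_eq_sum_range, PySem.List.pyRange_of_pos _ _ (by norm_num : (0:Int) < 2),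
          List.map_map]
        have hcnt : (if (p : Int) + 2 < (n : Int) then
            (((n : Int) - ((p : Int) + 2) + 2 - 1) / 2).toNat else 0) = tl.length := by
          rw [htllen]; split_ifs <;> omega
        rw [hcnt]
        congr 1
        apply List.map_congr_left
        intro k hk
        rw [List.mem_range] at hk
        have hi : p + 2 + 2 * k < n := by omega
        have hcast : ((p : Int) + 2 + 2 * ((k : Nat) : Int)) = (((p + 2 + 2 * k : Nat)) : Int) := by
          push_cast; ring
        have hgi : PySem.List.pyGetD bs (((p + 2 + 2 * k : Nat)) : Int) 0 = bs.getD (p + 2 + 2 * k) 0 := by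
          rw [PySem.List.pyGetD_natCast]
        have hgetk : tl.getD k 0 = bs.getD (p + 2 + 2 * k) 0 := by
          rw [List.getD_eq_getElem?_getD, List.getD_eq_getElem?_getD, htl,
            getElem?_everyOther, List.getElem?_drop]
        have hswap : pvSwap bs (p : Int) (((p + 2 + 2 * k : Nat)) : Int)
            = (bs.set (p + 2 + 2 * k) (bs.getD p 0)).set p (bs.getD (p + 2 + 2 * k) 0) := by
          unfold pvSwap
          simp only [PySem.List.pySetD_natCast, PySem.List.pyGetD_natCast,
            List.getD_eq_getElem?_getD]
        have hlen' : ((bs.set (p + 2 + 2 * k) (bs.getD p 0)).set p (bs.getD (p + 2 + 2 * k) 0)).length = n := by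
          simp
          omega
        have hne' : (bs.set (p + 2 + 2 * k) (bs.getD p 0)).set p (bs.getD (p + 2 + 2 * k) 0) ≠ [] := by
          apply List.ne_nil_of_length_pos
          omega
        have hIH := ih ((bs.set (p + 2 + 2 * k) (bs.getD p 0)).set p (bs.getD (p + 2 + 2 * k) 0))
          (p + 1) (by omega) hne'
        have hprev' : PySem.List.pyGetD
            ((bs.set (p + 2 + 2 * k) (bs.getD p 0)).set p (bs.getD (p + 2 + 2 * k) 0))
            (((p + 1 : Nat) : Int) - 1) 0 = bs.getD (p + 2 + 2 * k) 0 := by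
          have hc1 : (((p + 1 : Nat)) : Int) - 1 = ((p : Nat) : Int) := by push_cast; ring
          rw [hc1, PySem.List.pyGetD_natCast, List.getD_eq_getElem?_getD,
            List.getElem?_set_self (by simp; omega)]
          rfl
        have hstrideA : everyOther
            (((bs.set (p + 2 + 2 * k) (bs.getD p 0)).set p (bs.getD (p + 2 + 2 * k) 0)).drop (p + 1)) = ys := by
          apply List.ext_getElem?
          intro t
          rw [hys, getElem?_everyOther, getElem?_everyOther, List.getElem?_drop, List.getElem?_drop,
            List.getElem?_set_ne (by omega), List.getElem?_set_ne (by omega)]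
        have hstrideB : everyOther
            (((bs.set (p + 2 + 2 * k) (bs.getD p 0)).set p (bs.getD (p + 2 + 2 * k) 0)).drop (p + 2))
            = tl.set k (bs.getD p 0) := by
          apply List.ext_getElem?
          intro t
          rw [getElem?_everyOther, List.getElem?_drop,
            List.getElem?_set_ne (by omega : p ≠ p + 2 + 2 * t)]
          by_cases hkt : t = k
          · subst hkt
            rw [List.getElem?_set_self (by omega), List.getElem?_set_self (by omega)]
          · rw [List.getElem?_set_ne (by omega), List.getElem?_set_ne (by omega), htl,
              getElem?_everyOther, List.getElem?_drop]
        simp only [Function.comp_apply]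
        rw [hcast, hgi, ← hgetk, hswap,
          show ((p : Int) + 1) = (((p + 1 : Nat)) : Int) from by push_cast; ring,
          hIH, hprev', hstrideA, hstrideB]
        by_cases hc : pvPrimes.contains (prev + tl.getD k 0) = true
        · rw [if_pos hc, if_pos hc, hgetk,
            countGo_perm fuel (bs.getD (p + 2 + 2 * k) 0) (List.Perm.refl ys)
              ((List.set_perm_cons_eraseIdx (by omega) (bs.getD p 0)))]
        · rw [if_neg hc, if_neg hc]
-- ===== VERDICT (by name: the statement is the Claim_ definition above) =====
theorem solve_spec : Claim_equal_solve := by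
  intro beads pos _ hpre
  obtain ⟨h0, hle, hne⟩ := hpre
  unfold Spec_solve solve solve_alt
  obtain ⟨p, rfl⟩ : ∃ p : Nat, pos = (p : Int) := ⟨pos.toNat, (Int.toNat_of_nonneg h0).symm⟩
  have hple : p ≤ beads.length := by exact_mod_cast hle
  rw [show ((p : Int) + 1) = (((p + 1 : Nat)) : Int) from by push_cast; ring,
    slice?_two beads p, slice?_two beads (p + 1)]
  simp only [Option.getD_some]
  have hfuel1 : ((beads.length : Int) - (p : Int)).toNat + 1 = (beads.length - p) + 1 := by
    omega
  have hfuel2 : (everyOther (beads.drop p)).length + (everyOther (beads.drop (p + 1))).length + 1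
      = (beads.length - p) + 1 := by
    rw [length_everyOther, length_everyOther, List.length_drop, List.length_drop]
    omega
  rw [hfuel1, hfuel2]
  exact bridge (beads.length - p + 1) beads p hple hne
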